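-- pv_equiv track=rewrite | github.com/rafaud/advent-of-code | 2024/day04/main.py | check_vector
-- ===== SOURCE A (Python) =====
-- def check_vector(vector, searched_word):
--     vector_total = 0
--     for i in range(len(vector) - len(searched_word) + 1):
--         word = vector[i:i + len(searched_word)]
--         word = "".join(word)
--         if word in searched_word: vector_total += 1
--
--         word = vector[-1-i:-1-i-len(searched_word):-1]
--         word = "".join(word)
--         if word in searched_word: vector_total += 1
--
--     return vector_total
-- ===== SOURCE B (Python) =====
-- def check_vector(vector, searched_word):
--     m = len(searched_word)
--     if len(vector) < m:
--         return 0
--     total = 0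
--     window = vector[:m]
--     rest = vector[m:]
--     while True:
--         if "".join(window) in searched_word:
--             total += 1
--         if "".join(window[::-1]) in searched_word:
--             total += 1
--         if not rest:
--             break
--         window = (window + [rest[0]])[1:]
--         rest = rest[1:]
--     return total
-- ===== Notes on version B (the rewrite author's own statement) =====
-- stated objective: alternative
-- what changed: B replaces A's index loop that re-slices the list twice per step (once with a negative-stride slice from the back) by a single left-to-right sliding window maintained incrementally, testing each window and its element-reversal.
import Mathlib
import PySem

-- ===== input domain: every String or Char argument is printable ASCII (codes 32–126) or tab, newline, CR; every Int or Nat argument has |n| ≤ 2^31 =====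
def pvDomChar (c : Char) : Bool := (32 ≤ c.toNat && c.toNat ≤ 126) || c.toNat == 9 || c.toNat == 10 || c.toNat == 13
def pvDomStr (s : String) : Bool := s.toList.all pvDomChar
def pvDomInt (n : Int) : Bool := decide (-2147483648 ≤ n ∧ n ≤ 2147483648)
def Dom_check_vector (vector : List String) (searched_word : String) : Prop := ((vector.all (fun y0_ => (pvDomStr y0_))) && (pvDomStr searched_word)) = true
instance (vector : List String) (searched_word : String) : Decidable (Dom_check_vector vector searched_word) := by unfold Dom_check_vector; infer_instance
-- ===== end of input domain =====

-- B replaces A's index loop with two negative-stride slices by a single incrementally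
-- maintained sliding window scanned once left-to-right (objective: alternative/simpler).

-- ===== PORT A =====
def check_vector (vector : List String) (searched_word : String) : Int :=
  (PySem.List.pyRange 0 ((vector.length : Int) - PySem.Str.len searched_word + 1) 1).foldl
    (fun vector_total i =>
      let word := PySem.List.slice vector (some i) (some (i + PySem.Str.len searched_word))
      let word1 := PySem.Str.join "" word
      let vector_total := if PySem.Str.isIn word1 searched_word then vector_total + 1 else vector_total
      let word := (PySem.List.slice? vector (some (-1 - i)) (some (-1 - i - PySem.Str.len searched_word)) (-1)).getD []
      let word2 := PySem.Str.join "" word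
      if PySem.Str.isIn word2 searched_word then vector_total + 1 else vector_total)
    0

-- ===== PORT B =====
def altLoop (searched_word : String) (window : List String) (rest : List String) (total : Int) : Int :=
  let total := if PySem.Str.isIn (PySem.Str.join "" window) searched_word then total + 1 else total
  let total := if PySem.Str.isIn (PySem.Str.join "" ((PySem.List.slice? window none none (-1)).getD [])) searched_word then total + 1 else total
  match rest with
  | [] => total
  | r :: rs => altLoop searched_word (PySem.List.slice (window ++ [r]) (some 1) none) rs total

def check_vector_alt (vector : List String) (searched_word : String) : Int :=
  let m := PySem.Str.len searched_word
  if (vector.length : Int) < m then 0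
  else altLoop searched_word (PySem.List.slice vector none (some m)) (PySem.List.slice vector (some m) none) 0

-- ===== PRECONDITION & SPEC =====
def Spec_check_vector (vector : List String) (searched_word : String) (out : Int) : Prop := out = check_vector_alt vector searched_word
instance (vector : List String) (searched_word : String) (out : Int) : Decidable (Spec_check_vector vector searched_word out) := by unfold Spec_check_vector; infer_instance

-- ===== CLAIM (what is proved, stated in full; the proofs are below) =====
def Claim_equal_check_vector : Prop := ∀ (vector : List String) (searched_word : String), Dom_check_vector vector searched_word → Spec_check_vector vector searched_word (check_vector vector searched_word)

-- ===== LEMMAS AND PROOFS =====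

def pvF (sw : String) (ws : List String) : Int :=
  if PySem.Str.isIn (PySem.Str.join "" ws) sw then 1 else 0

def pvWin (v : List String) (m j : Nat) : List String := (v.drop j).take m

lemma pv_filterMap_range {α : Type} (l : List α) (s m : Nat) (h : s + m ≤ l.length) :
    List.filterMap (fun k => l[s + k]?) (List.range m) = (l.drop s).take m := by
  induction m with
  | zero => simp
  | succ m ih =>
    rw [List.range_succ, List.filterMap_append, ih (by omega), List.take_succ]
    have hm : s + m < l.length := by omega
    simp [List.getElem?_eq_getElem hm]

lemma pv_rev_slice (v : List String) (m j : Nat) (h : j + m ≤ v.length) :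
    PySem.List.slice? v (some (-1 - (j : Int))) (some (-1 - (j : Int) - (m : Int))) (-1)
      = some ((pvWin v m (v.length - m - j)).reverse) := by
  have hj : ((-1 : Int) - (j : Int) < 0) := by omega
  have hjm : ((-1 : Int) - (j : Int) - (m : Int) < 0) := by omega
  unfold PySem.List.slice? PySem.List.sliceIndices
  simp only [if_neg (by omega : ¬ ((-1 : Int) = 0)), if_pos hj, if_pos hjm,
    if_neg (by omega : ¬ ((0 : Int) < -1)), if_pos (by omega : ((-1:Int) < 0))]
  have hmax1 : max (-1 - (j : Int) + (v.length : Int)) (-1) = (v.length : Int) - 1 - j := by omega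
  have hmax2 : max (-1 - (j : Int) - (m : Int) + (v.length : Int)) (-1) = (v.length : Int) - 1 - j - m := by omega
  rw [hmax1, hmax2]
  have hcount : (if ((v.length : Int) - 1 - j - m) < ((v.length : Int) - 1 - j) then
      ((((v.length : Int) - 1 - j) - ((v.length : Int) - 1 - j - m) + - -1 - 1) / - -1).toNat else 0) = m := by
    by_cases hm : m = 0
    · simp [hm]
    · rw [if_pos (by omega)]
      have : (((v.length : Int) - 1 - j) - ((v.length : Int) - 1 - j - m) + - -1 - 1) / - -1 = (m : Int) := by
        norm_num
      rw [this, Int.toNat_natCast]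
  rw [hcount]
  rw [List.filterMap_congr (g := fun k => v.reverse[j + k]?)
    (by
      intro x hx
      rw [List.mem_range] at hx
      have hlen : j + x < v.reverse.length := by simp; omega
      show _ = v.reverse[j + x]?
      rw [List.getElem?_reverse (by simpa using hlen)]
      congr 1
      simp
      omega)]
  rw [pv_filterMap_range v.reverse j m (by simp; omega)]
  congr 1
  have h1 : v.reverse.drop j = (v.take (v.length - j)).reverse := by
    rw [List.reverse_take]
    congr 1
    omega
  rw [h1, List.take_reverse]
  congr 1
  rw [List.length_take, List.drop_take]
  have : min (v.length - j) v.length - m = v.length - m - j := by omega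
  rw [this]
  have : v.length - j - (v.length - m - j) = m := by omega
  rw [pvWin, this]

lemma pv_ite_body (sw : String) (acc : Int) (w1 w2 : List String) :
    (if PySem.Str.isIn (PySem.Str.join "" w2) sw then
        (if PySem.Str.isIn (PySem.Str.join "" w1) sw then acc + 1 else acc) + 1
      else (if PySem.Str.isIn (PySem.Str.join "" w1) sw then acc + 1 else acc))
      = acc + (pvF sw w1 + pvF sw w2) := by
  unfold pvF
  split_ifs <;> omega

lemma pv_A_sum (v : List String) (sw : String) (h : sw.toList.length ≤ v.length) :
    check_vector v sw
      = ((List.range (v.length - sw.toList.length + 1)).map (fun i => pvF sw (pvWin v sw.toList.length i))).sum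
      + ((List.range (v.length - sw.toList.length + 1)).map (fun i => pvF sw (pvWin v sw.toList.length (v.length - sw.toList.length - i)).reverse)).sum := by
  unfold check_vector
  rw [PySem.Str.len_eq, PySem.List.pyRange_one]
  have hK : (((v.length : Int) - sw.toList.length + 1) - 0).toNat = v.length - sw.toList.length + 1 := by omega
  rw [hK, List.foldl_map]
  refine Eq.trans (PySem.List.foldl_congr_mem _ _
    (fun acc (k : Nat) => acc + (pvF sw (pvWin v sw.toList.length k)
        + pvF sw (pvWin v sw.toList.length (v.length - sw.toList.length - k)).reverse))
    _ ?_) ?_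
  · intro acc k hk
    rw [List.mem_range] at hk
    simp only [zero_add]
    rw [PySem.List.slice_natCast_add, pv_rev_slice v sw.toList.length k (by omega)]
    simp only [Option.getD_some]
    exact pv_ite_body sw acc _ _
  · rw [PySem.List.foldl_add, zero_add, PySem.List.sum_map_add_int]

lemma pv_reflect (f : ℕ → ℤ) (K : ℕ) :
    ((List.range K).map (fun j => f (K - 1 - j))).sum = ((List.range K).map f).sum :=
  Finset.sum_range_reflect f K

lemma pv_window_step (v : List String) (m j : Nat) (h : j + m < v.length) :
    (pvWin v m j ++ [v[j + m]]).tail = pvWin v m (j + 1) := by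
  unfold pvWin
  have hd : v.drop j = v[j]'(by omega) :: v.drop (j + 1) :=
    List.drop_eq_getElem_cons (by omega)
  have he : (v.drop j)[m]? = some (v[j + m]) := by
    rw [List.getElem?_drop]
    exact List.getElem?_eq_getElem h
  have h1 : (v.drop j).take m ++ [v[j + m]] = (v.drop j).take (m + 1) := by
    rw [List.take_succ, he]
    rfl
  rw [h1, hd, List.take_succ_cons]
  rfl

lemma pv_sum_shift (g : Nat → Int) (d j : Nat) :
    ((List.range (d + 1)).map (fun k => g (j + k))).sum
      = g j + ((List.range d).map (fun k => g (j + 1 + k))).sum := by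
  rw [List.range_succ_eq_map, List.map_cons, List.map_map, List.sum_cons, Nat.add_zero]
  congr 2
  apply List.map_congr_left
  intro k _
  simp only [Function.comp]
  congr 1
  omega

lemma pv_altLoop (sw : String) (v : List String) (m : Nat) :
    ∀ (d j : Nat) (t : Int), j + m ≤ v.length → d = v.length - m - j →
    altLoop sw (pvWin v m j) (v.drop (j + m)) t
      = t + ((List.range (d + 1)).map
          (fun k => pvF sw (pvWin v m (j + k)) + pvF sw (pvWin v m (j + k)).reverse)).sum := by
  intro d
  induction d with
  | zero =>
    intro j t hj hd
    have hjm : j + m = v.length := by omega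
    have hnil : v.drop (j + m) = [] := by
      rw [hjm]; simp
    rw [hnil]
    unfold altLoop
    simp only [PySem.List.slice?_none_none_neg_one, Option.getD_some, pv_ite_body]
    simp
  | succ d ih =>
    intro j t hj hd
    have hlt : j + m < v.length := by omega
    have hcons : v.drop (j + m) = v[j + m]'hlt :: v.drop (j + m + 1) :=
      List.drop_eq_getElem_cons hlt
    rw [hcons]
    unfold altLoop
    simp only [PySem.List.slice?_none_none_neg_one, Option.getD_some, pv_ite_body]
    rw [PySem.List.slice_from_one, pv_window_step v m j hlt]
    have hdrop : v.drop (j + m + 1) = v.drop ((j + 1) + m) := by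
      congr 1
      omega
    rw [hdrop, ih (j + 1) _ (by omega) (by omega),
      pv_sum_shift (fun i => pvF sw (pvWin v m i) + pvF sw (pvWin v m i).reverse) (d + 1) j]
    ring

lemma pv_main : ∀ (vector : List String) (searched_word : String),
    check_vector vector searched_word = check_vector_alt vector searched_word := by
  intro v sw
  by_cases h : v.length < sw.toList.length
  · unfold check_vector check_vector_alt
    simp only [PySem.Str.len_eq]
    rw [PySem.List.pyRange_one_eq_nil (by omega), List.foldl_nil,
      if_pos (by exact_mod_cast h)]
  · have hm : sw.toList.length ≤ v.length := by omega
    rw [pv_A_sum v sw hm]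
    unfold check_vector_alt
    simp only [PySem.Str.len_eq]
    rw [if_neg (by omega), PySem.List.slice_to_natCast, PySem.List.slice_from_natCast]
    have h0 : v.take sw.toList.length = pvWin v sw.toList.length 0 := by
      simp [pvWin]
    have h1 : v.drop sw.toList.length = v.drop (0 + sw.toList.length) := by
      norm_num
    rw [h0, h1, pv_altLoop sw v sw.toList.length (v.length - sw.toList.length - 0) 0 0
      (by omega) rfl, zero_add]
    have h2 : ((List.range (v.length - sw.toList.length + 1)).map
        (fun i => pvF sw (pvWin v sw.toList.length (v.length - sw.toList.length - i)).reverse)).sum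
        = ((List.range (v.length - sw.toList.length + 1)).map
        (fun i => pvF sw (pvWin v sw.toList.length i).reverse)).sum := by
      rw [List.map_congr_left (g := fun i => (fun j => pvF sw (pvWin v sw.toList.length j).reverse)
        ((v.length - sw.toList.length + 1) - 1 - i))
        (by intro k _; simp)]
      exact pv_reflect (fun j => pvF sw (pvWin v sw.toList.length j).reverse) _
    rw [h2]
    simp only [Nat.zero_add]
    exact (PySem.List.sum_map_add_int _ _ _).symm

-- ===== VERDICT (by name: the statement is the Claim_ definition above) =====
theorem check_vector_spec : Claim_equal_check_vector := by
  intro vector searched_word _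
  unfold Spec_check_vector
  exact pv_main vector searched_word
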